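-- pv_equiv track=rewrite | github.com/Kimsc9976/study_algorithm | 백준/Silver/5397. 키로거/키로거.py | keylog
-- ===== SOURCE A (Python) =====
-- def keylog(txt):
--     left = []
--     right = []
--
--     for char in txt:
--         if char == '<' and left:
--             right.append(left.pop())
--         elif char == '>' and right:
--             left.append(right.pop())
--         elif char == '-' and left:
--             left.pop()
--         elif char != '<' and char != '>' and char != '-':
--             left.append(char)
--
--     rlt = ''.join(left) + ''.join(list(reversed(right)))
--     return rlt
-- ===== SOURCE B (Python) =====
-- def keylog(txt):
--     result = []
--     pos = 0
--     for char in txt: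
--         if char == '<':
--             if pos > 0:
--                 pos -= 1
--         elif char == '>':
--             if pos < len(result):
--                 pos += 1
--         elif char == '-':
--             if pos > 0:
--                 del result[pos - 1]
--                 pos -= 1
--         else:
--             result.insert(pos, char)
--             pos += 1
--     return ''.join(result)
-- ===== Notes on version B (the rewrite author's own statement) =====
-- stated objective: simpler
-- what changed: Replaces the two mirrored stacks (left/right) by a single buffer list with an integer cursor, inserting/deleting at the cursor and joining once at the end.
import Mathlib
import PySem

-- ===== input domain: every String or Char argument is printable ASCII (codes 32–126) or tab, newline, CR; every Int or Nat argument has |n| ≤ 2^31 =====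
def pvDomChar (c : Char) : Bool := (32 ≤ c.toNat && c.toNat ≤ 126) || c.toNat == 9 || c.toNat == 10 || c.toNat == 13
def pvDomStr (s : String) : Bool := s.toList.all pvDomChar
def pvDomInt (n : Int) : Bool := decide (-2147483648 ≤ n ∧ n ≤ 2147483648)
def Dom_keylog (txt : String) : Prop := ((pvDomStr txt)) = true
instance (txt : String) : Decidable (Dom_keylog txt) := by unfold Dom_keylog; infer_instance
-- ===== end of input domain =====

-- B replaces the two mirrored stacks with a single buffer list addressed by a moving cursor (objective: simpler).


-- ===== PORT A =====
-- left/right stacks, stored head = stack top (Python list end).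
def keylogStepA (s : List Char × List Char) (c : Char) : List Char × List Char :=
  let (l, r) := s
  if c = '<' ∧ l ≠ [] then (l.tail, l.headD default :: r)
  else if c = '>' ∧ r ≠ [] then (r.headD default :: l, r.tail)
  else if c = '-' ∧ l ≠ [] then (l.tail, r)
  else if c ≠ '<' ∧ c ≠ '>' ∧ c ≠ '-' then (c :: l, r)
  else (l, r)

def keylog (txt : String) : String :=
  let (l, r) := txt.toList.foldl keylogStepA ([], [])
  -- ''.join(left) + ''.join(reversed(right)): left bottom→top = l.reverse; reversed(right) = r
  String.mk (l.reverse ++ r)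

-- ===== PORT B =====
-- single buffer with cursor; insert/delete at the cursor (Python list.insert / del).
def keylogStepB (s : List Char × Nat) (c : Char) : List Char × Nat :=
  let (res, pos) := s
  if c = '<' then if 0 < pos then (res, pos - 1) else (res, pos)
  else if c = '>' then if pos < res.length then (res, pos + 1) else (res, pos)
  else if c = '-' then
    if 0 < pos then (res.take (pos - 1) ++ res.drop pos, pos - 1) else (res, pos)
  else (res.take pos ++ c :: res.drop pos, pos + 1)

def keylog_alt (txt : String) : String :=
  String.mk (txt.toList.foldl keylogStepB ([], 0)).1

-- ===== PRECONDITION & SPEC =====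
def Spec_keylog (txt : String) (out : String) : Prop := out = keylog_alt txt
instance (txt : String) (out : String) : Decidable (Spec_keylog txt out) := by unfold Spec_keylog; infer_instance

-- ===== CLAIM (what is proved, stated in full; the proofs are below) =====
def Claim_equal_keylog : Prop := ∀ (txt : String), Dom_keylog txt → Spec_keylog txt (keylog txt)

-- ===== LEMMAS AND PROOFS =====

-- Invariant: B's state is (l.reverse ++ r, l.length) whenever A's state is (l, r).
theorem keylog_inv (cs : List Char) : ∀ (l r : List Char),
    cs.foldl keylogStepB (l.reverse ++ r, l.length) =
      ((cs.foldl keylogStepA (l, r)).1.reverse ++ (cs.foldl keylogStepA (l, r)).2,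
       (cs.foldl keylogStepA (l, r)).1.length) := by
  induction cs with
  | nil => intro l r; simp
  | cons c cs ih =>
    intro l r
    simp only [List.foldl_cons]
    by_cases h1 : c = '<'
    · subst h1
      cases l with
      | nil => simpa [keylogStepA, keylogStepB] using ih [] r
      | cons x t =>
        have := ih t (x :: r)
        simp only [keylogStepA, keylogStepB] at *
        simpa using this
    · by_cases h2 : c = '>'
      · subst h2
        cases r with
        | nil =>
          have := ih l ([] : List Char)
          simp only [keylogStepA, keylogStepB] at *
          simpa using this
        | cons x t =>
          have := ih (x :: l) t
          simp only [keylogStepA, keylogStepB] at *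
          simpa [Nat.lt_add_one_iff] using this
      · by_cases h3 : c = '-'
        · subst h3
          cases l with
          | nil => simpa [keylogStepA, keylogStepB] using ih [] r
          | cons x t =>
            have := ih t r
            simp only [keylogStepA, keylogStepB] at *
            have htake : ((x :: t).reverse ++ r).take t.length = t.reverse := by
              rw [show (x :: t).reverse ++ r = t.reverse ++ ([x] ++ r) by simp]
              rw [List.take_append_of_le_length (by simp)]
              simp
            have hdrop : (t.reverse ++ x :: r).drop (t.length + 1) = r := by
              rw [show t.reverse ++ x :: r = (t.reverse ++ [x]) ++ r by simp]
              rw [List.drop_append_of_le_length (by simp)]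
              simp
            simpa [htake, hdrop] using this
        · -- ordinary character: insert
          have := ih (c :: l) r
          simp only [keylogStepA, keylogStepB] at *
          have htake : (l.reverse ++ r).take l.length = l.reverse := by
            rw [List.take_append_of_le_length (by simp)]; simp
          have hdrop : (l.reverse ++ r).drop l.length = r := by
            rw [List.drop_append_of_le_length (by simp)]; simp
          simpa [h1, h2, h3, htake, hdrop] using this

-- ===== VERDICT (by name: the statement is the Claim_ definition above) =====
theorem keylog_spec : Claim_equal_keylog := by
  intro txt _
  unfold Spec_keylog keylog keylog_alt
  have := keylog_inv txt.toList [] []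
  simp only [List.reverse_nil, List.nil_append, List.length_nil] at this
  rw [this]
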